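-- pv_equiv track=rewrite | github.com/PMCC-BioinformaticsCore/janis-core | janis_core/ingestion/galaxy/gxtool/command/tokens/factory.py | _strip_common_attributes
-- ===== SOURCE A (Python) =====
-- def _strip_common_attributes(text: str) -> str:
--     #return text
--     gx_attributes = set([
--         '.forward',
--         '.reverse',
--         '.ext',
--         '.value',
--         '.name',
--         #'.files_path',
--         '.element_identifier'
--     ])
--     # needs to be recursive so we can iterately peel back
--     # eg  in1.forward.ext
--     # need to peel .ext then peel .forward.
--     for att in gx_attributes:
--         if text.endswith(att):
--             # strip from the right - num of chars in the att
--             text = text[:-len(att)]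
--             # recurse
--             text = _strip_common_attributes(text)
--     return text
-- ===== SOURCE B (Python) =====
-- def _strip_common_attributes(text: str) -> str:
--     suffixes = ('.forward', '.reverse', '.ext', '.value', '.name', '.element_identifier')
--     while True:
--         for suf in suffixes:
--             if text.endswith(suf):
--                 text = text[:-len(suf)]
--                 break
--         else:
--             return text
-- ===== Notes on version B (the rewrite author's own statement) =====
-- stated objective: simpler
-- what changed: Replaced the self-recursive peel (recursing inside a for-loop over the suffix set) by a flat iterative while-loop that strips the first matching suffix and rescans, returning when none matches.
import Mathlib
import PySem

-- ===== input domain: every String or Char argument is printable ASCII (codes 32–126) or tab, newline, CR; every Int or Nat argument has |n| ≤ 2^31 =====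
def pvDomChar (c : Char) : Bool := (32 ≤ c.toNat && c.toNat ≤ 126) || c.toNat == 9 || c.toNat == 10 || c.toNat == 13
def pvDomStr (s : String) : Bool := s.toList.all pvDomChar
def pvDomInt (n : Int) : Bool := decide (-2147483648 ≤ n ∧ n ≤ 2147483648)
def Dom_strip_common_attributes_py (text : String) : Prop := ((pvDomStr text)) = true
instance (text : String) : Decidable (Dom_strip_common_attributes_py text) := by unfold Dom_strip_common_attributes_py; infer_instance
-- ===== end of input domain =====

-- B replaces A's self-recursion (a recursive call inside the for-loop over the suffix set)
-- by a flat iterative loop: strip the first matching suffix and rescan; simpler, constant stack.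

-- ===== PORT A =====
-- gx_attributes = set([...]) (result is order-independent: no string ends with two of these suffixes)
def gxAttributes : List (List Char) :=
  PySem.Set.ofList [".forward".toList, ".reverse".toList, ".ext".toList,
                    ".value".toList, ".name".toList, ".element_identifier".toList]

-- text[:-len(att)]
def pvStrip (t a : List Char) : List Char :=
  PySem.Chars.slice t none (some (-(a.length : Int)))

lemma gxAttributes_ne : ∀ x ∈ gxAttributes, x ≠ [] := by decide

lemma pvStrip_lt {t a : List Char} (h : PySem.Chars.endswith t a = true) (ha : a ≠ []) :
    (pvStrip t a).length < t.length := by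
  have hsuf : a <:+ t := (PySem.Chars.endswith_iff t a).mp h
  have hlen : a.length ≤ t.length := hsuf.length_le
  have hpos : 0 < a.length := List.length_pos_iff.mpr ha
  have : pvStrip t a = t.take (t.length - a.length) := by
    simp [pvStrip, PySem.List.slice_to_neg_natCast t a.length hpos]
  rw [this]
  simp [List.length_take]
  omega

-- A: for att in gx_attributes: if text.endswith(att): text = text[:-len(att)]; text = recurse(text)
-- (the subtype carries the length bound needed only for Lean's termination proof)
mutual
def pyAChars (t : List Char) : {r : List Char // r.length ≤ t.length} :=
  pyALoop gxAttributes gxAttributes_ne t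
termination_by (t.length, 7)
decreasing_by exact Prod.Lex.right _ (by decide)

def pyALoop (as : List (List Char)) (hs : ∀ x ∈ as, x ≠ []) (t : List Char) :
    {r : List Char // r.length ≤ t.length} :=
  match as, hs with
  | [], _ => ⟨t, le_refl _⟩
  | a :: as, hs =>
    if h : PySem.Chars.endswith t a = true then
      have hlt : (pvStrip t a).length < t.length := pvStrip_lt h (hs a (by simp))
      let r := pyAChars (pvStrip t a)
      let r2 := pyALoop as (fun x hx => hs x (by simp [hx])) r.val
      ⟨r2.val, le_trans r2.2 (le_trans r.2 (le_of_lt hlt))⟩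
    else
      pyALoop as (fun x hx => hs x (by simp [hx])) t
termination_by (t.length, as.length)
decreasing_by
  · exact Prod.Lex.left _ _ hlt
  · exact Prod.Lex.left _ _ (lt_of_le_of_lt r.2 hlt)
  · exact Prod.Lex.right _ (by simp)
end

def strip_common_attributes_py (text : String) : String :=
  String.ofList (pyAChars text.toList).val

-- ===== PORT B =====
-- B: while True: strip the first suffix text endswith, break to rescan; else return text
def altGo (t : List Char) : List Char :=
  match hf : gxAttributes.find? (fun a => PySem.Chars.endswith t a) with
  | some a => altGo (pvStrip t a)
  | none => t
termination_by t.length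
decreasing_by
  exact pvStrip_lt (by simpa using List.find?_some hf)
    (gxAttributes_ne a (List.mem_of_find?_eq_some hf))

def strip_common_attributes_py_alt (text : String) : String :=
  String.ofList (altGo text.toList)

-- ===== PRECONDITION & SPEC =====
def Spec_strip_common_attributes_py (text : String) (out : String) : Prop := out = strip_common_attributes_py_alt text
instance (text : String) (out : String) : Decidable (Spec_strip_common_attributes_py text out) := by unfold Spec_strip_common_attributes_py; infer_instance

-- ===== CLAIM (what is proved, stated in full; the proofs are below) =====
def Claim_equal_strip_common_attributes_py : Prop := ∀ (text : String), Dom_strip_common_attributes_py text → Spec_strip_common_attributes_py text (strip_common_attributes_py text)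

-- ===== LEMMAS AND PROOFS =====

-- the loop over suffixes none of which match is the identity
lemma pyALoop_skip (as : List (List Char)) (hs : ∀ x ∈ as, x ≠ []) (t : List Char)
    (h : ∀ a ∈ as, PySem.Chars.endswith t a = false) :
    (pyALoop as hs t).val = t := by
  induction as with
  | nil => rw [pyALoop.eq_def]
  | cons a as ih =>
    rw [pyALoop.eq_def]
    simp only [h a (by simp)]
    exact ih _ (fun b hb => h b (by simp [hb]))

-- A's result never ends with any of the suffixes
lemma pyALoop_noMatch (n : Nat) : ∀ t : List Char, t.length ≤ n →
    ∀ (as : List (List Char)) (hs : ∀ x ∈ as, x ≠ []),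
    (∀ x ∈ as, x ∈ gxAttributes) →
    (∀ a ∈ gxAttributes, a ∉ as → PySem.Chars.endswith t a = false) →
    ∀ a ∈ gxAttributes, PySem.Chars.endswith (pyALoop as hs t).val a = false := by
  induction n using Nat.strong_induction_on with
  | _ n IH =>
    intro t ht as
    induction as generalizing t with
    | nil =>
      intro hs _ hproc a ha
      rw [pyALoop.eq_def]
      exact hproc a ha (by simp)
    | cons a as ih =>
      intro hs hsub hproc b hb
      rw [pyALoop.eq_def]
      by_cases h : PySem.Chars.endswith t a = true
      · simp only [h, dite_true]
        have hlt : (pvStrip t a).length < t.length := pvStrip_lt h (hs a (by simp))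
        have key : ∀ c ∈ gxAttributes,
            PySem.Chars.endswith (pyAChars (pvStrip t a)).val c = false := by
          intro c hc
          rw [pyAChars.eq_def]
          exact IH (pvStrip t a).length (by omega) _ (le_refl _) gxAttributes _
            (fun x hx => hx) (fun d hd hdn => absurd hd hdn) c hc
        exact ih _ (le_trans (pyAChars (pvStrip t a)).2 (by omega)) _
          (fun x hx => hsub x (by simp [hx]))
          (fun c hc _ => key c hc) b hb
      · simp only [h]
        refine ih t ht _ (fun x hx => hsub x (by simp [hx])) ?_ b hb
        intro c hc hcn
        by_cases hca : c = a
        · subst hca; exact eq_false_of_ne_true h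
        · exact hproc c hc (by simp [hca, hcn])

-- main equivalence on the char level
lemma altGo_none (t : List Char)
    (hf : gxAttributes.find? (fun a => PySem.Chars.endswith t a) = none) : altGo t = t := by
  rw [altGo.eq_def]; split <;> simp_all

lemma altGo_some (t : List Char) (a : List Char)
    (hf : gxAttributes.find? (fun a => PySem.Chars.endswith t a) = some a) :
    altGo t = altGo (pvStrip t a) := by
  rw [altGo.eq_def]; split <;> simp_all

lemma pyAChars_eq_altGo (n : Nat) : ∀ t : List Char, t.length ≤ n →
    (pyAChars t).val = altGo t := by
  induction n using Nat.strong_induction_on with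
  | _ n IH =>
    intro t ht
    have sub : ∀ (as : List (List Char)) (hs : ∀ x ∈ as, x ≠ [])
        (hsub : ∀ x ∈ as, x ∈ gxAttributes),
        (pyALoop as hs t).val =
          match as.find? (fun a => PySem.Chars.endswith t a) with
          | some a => (pyAChars (pvStrip t a)).val
          | none => t := by
      intro as
      induction as with
      | nil => intro _ _; rw [pyALoop.eq_def]; rfl
      | cons a as ih =>
        intro hs hsub
        rw [pyALoop.eq_def]
        by_cases h : PySem.Chars.endswith t a = true
        · simp only [h, dite_true, List.find?_cons_of_pos h]
          show (pyALoop as _ (pyAChars (pvStrip t a)).val).val = (pyAChars (pvStrip t a)).val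
          refine pyALoop_skip _ _ _ ?_
          intro c hc
          rw [pyAChars.eq_def]
          exact pyALoop_noMatch (pvStrip t a).length (pvStrip t a) (le_refl _)
            gxAttributes gxAttributes_ne (fun x hx => hx)
            (fun d hd hdn => absurd hd hdn) c (hsub c (by simp [hc]))
        · simp only [h, List.find?_cons_of_neg (by simpa using h)]
          exact ih _ (fun x hx => hsub x (by simp [hx]))
    rcases hf : gxAttributes.find? (fun a => PySem.Chars.endswith t a) with _ | a
    · rw [pyAChars.eq_def, sub _ gxAttributes_ne (fun x hx => hx), altGo_none t hf]
      simp only [hf]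
    · rw [pyAChars.eq_def, sub _ gxAttributes_ne (fun x hx => hx), altGo_some t a hf]
      simp only [hf]
      have h : PySem.Chars.endswith t a = true := by simpa using List.find?_some hf
      have hlt : (pvStrip t a).length < t.length :=
        pvStrip_lt h (gxAttributes_ne a (List.mem_of_find?_eq_some hf))
      exact IH (pvStrip t a).length (by omega) _ (le_refl _)

-- ===== VERDICT (by name: the statement is the Claim_ definition above) =====
theorem strip_common_attributes_py_spec : Claim_equal_strip_common_attributes_py := by
  intro text _
  unfold Spec_strip_common_attributes_py strip_common_attributes_py strip_common_attributes_py_alt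
  rw [pyAChars_eq_altGo text.toList.length _ (le_refl _)]
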